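-- pv_equiv track=rewrite | github.com/avrrodriguez/hra_back_end | hra_back_end/wikiped_get.py | remove_nonwords
-- ===== SOURCE A (Python) =====
-- def remove_nonwords(info):
--     '''
--     Turns list from multiple lists to one list
--     '''
--     new_list = ""
--
--     for element in info:
--         for i in element:
--             if i.lower() in 'abcdefghijklmnopqrstuvwxyz' or i == " ":
--                 new_list += i
--
--     new_list = new_list.split(" ")
--
--     return new_list
-- ===== SOURCE B (Python) =====
-- def remove_nonwords(info):
--     '''
--     Turns list from multiple lists to one list
--     '''
--     words = []
--     current = ""
--
--     for element in info:
--         for i in element: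
--             if i.lower() in 'abcdefghijklmnopqrstuvwxyz' or i == " ":
--                 if i == " ":
--                     words.append(current)
--                     current = ""
--                 else:
--                     current += i
--
--     words.append(current)
--     return words
-- ===== Notes on version B (the rewrite author's own statement) =====
-- stated objective: alternative
-- what changed: B splits into words in a single streaming pass (result list + current-word accumulator, flushed on each kept space) instead of concatenating all kept characters into one string and calling .split(' ') afterwards.
import Mathlib
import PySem

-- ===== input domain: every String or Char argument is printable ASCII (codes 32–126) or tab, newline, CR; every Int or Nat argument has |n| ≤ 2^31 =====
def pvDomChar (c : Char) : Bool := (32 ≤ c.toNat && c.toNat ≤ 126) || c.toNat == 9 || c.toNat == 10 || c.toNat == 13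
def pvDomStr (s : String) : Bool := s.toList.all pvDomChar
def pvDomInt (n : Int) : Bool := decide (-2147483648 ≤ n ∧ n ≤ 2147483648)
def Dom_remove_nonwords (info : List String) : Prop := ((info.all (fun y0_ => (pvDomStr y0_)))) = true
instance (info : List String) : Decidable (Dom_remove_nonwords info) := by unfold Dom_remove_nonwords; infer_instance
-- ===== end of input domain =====

-- B replaces A's build-one-string-then-split(' ') by a single streaming pass that
-- flushes the current word on each kept space (same values; objective: alternative decomposition).

-- the character filter shared by both Pythons: i.lower() in 'abcdefghijklmnopqrstuvwxyz' or i == " "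
def pvKeep (i : Char) : Bool :=
  PySem.Chars.isIn [PySem.Chars.lowerChar i] "abcdefghijklmnopqrstuvwxyz".toList || i == ' '

-- ===== PORT A =====
def remove_nonwords (info : List String) : List String :=
  (PySem.Chars.splitOn
    (info.foldl (fun acc element =>
      element.toList.foldl (fun acc i => if pvKeep i then acc ++ [i] else acc) acc) [])
    " ".toList).map String.mk

-- ===== PORT B =====
-- one streaming step of B's loop body (on a kept char)
def pvStep (st : List String × List Char) (i : Char) : List String × List Char :=
  if pvKeep i then
    if i == ' ' then (st.1 ++ [String.mk st.2], []) else (st.1, st.2 ++ [i])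
  else st

-- `words.append(current); return words` at the end of B's loop
def pvFinish (st : List String × List Char) : List String := st.1 ++ [String.mk st.2]

def remove_nonwords_alt (info : List String) : List String :=
  pvFinish (info.foldl (fun st element => element.toList.foldl pvStep st) ([], []))

-- ===== PRECONDITION & SPEC =====
def Spec_remove_nonwords (info : List String) (out : List String) : Prop := out = remove_nonwords_alt info
instance (info : List String) (out : List String) : Decidable (Spec_remove_nonwords info out) := by unfold Spec_remove_nonwords; infer_instance

-- ===== CLAIM (what is proved, stated in full; the proofs are below) =====
def Claim_equal_remove_nonwords : Prop := ∀ (info : List String), Dom_remove_nonwords info → Spec_remove_nonwords info (remove_nonwords info)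

-- ===== LEMMAS AND PROOFS =====

-- forward-recursive splitter on the single separator ' ' (proof vehicle relating both ports)
def pvSC (cur : List Char) : List Char → List (List Char)
  | [] => [cur]
  | c :: rest => if c = ' ' then cur :: pvSC [] rest else pvSC (cur ++ [c]) rest

theorem pvSC_go (fuel : Nat) : ∀ (l cur : List Char) (acc : List (List Char)),
    l.length < fuel →
    PySem.Chars.splitOn.go [' '] fuel l cur acc = acc.reverse ++ pvSC cur.reverse l := by
  induction fuel with
  | zero => intro l cur acc h; omega
  | succ n ih =>
    intro l cur acc h
    cases l with
    | nil => simp [PySem.Chars.splitOn.go, pvSC]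
    | cons c rest =>
      simp only [PySem.Chars.splitOn.go]
      by_cases hc : c = ' '
      · subst hc
        rw [if_pos (by simp [List.isPrefixOf])]
        rw [show List.drop [' '].length (' ' :: rest) = rest from rfl]
        rw [ih rest [] (cur.reverse :: acc) (by simpa using Nat.lt_of_succ_lt_succ h)]
        simp [pvSC]
      · rw [if_neg (by simp [List.isPrefixOf]; exact fun hh => hc hh.symm)]
        rw [ih rest (c :: cur) acc (by simpa using Nat.lt_of_succ_lt_succ h)]
        simp [pvSC, hc]

theorem splitOn_eq_pvSC (s : List Char) :
    PySem.Chars.splitOn s " ".toList = pvSC [] s := by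
  have : (" ".toList) = [' '] := rfl
  rw [this, PySem.Chars.splitOn, pvSC_go (s.length + 1) s [] [] (by omega)]
  simp

-- A's inner char loop appends exactly the kept chars
theorem A_inner (cs : List Char) : ∀ acc : List Char,
    cs.foldl (fun acc i => if pvKeep i then acc ++ [i] else acc) acc = acc ++ cs.filter pvKeep := by
  induction cs with
  | nil => simp
  | cons c rest ih =>
    intro acc
    by_cases h : pvKeep c <;> simp [ih, h]

-- A's whole accumulation is the flattened kept chars
theorem A_accum (info : List String) : ∀ acc : List Char,
    info.foldl (fun acc element =>
      element.toList.foldl (fun acc i => if pvKeep i then acc ++ [i] else acc) acc) acc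
      = acc ++ info.flatMap (fun e => e.toList.filter pvKeep) := by
  induction info with
  | nil => simp
  | cons e rest ih =>
    intro acc
    rw [List.foldl_cons, A_inner, ih, List.flatMap_cons, List.append_assoc]

-- B's step skips non-kept chars, so each inner loop equals folding over the kept chars
theorem B_inner (cs : List Char) (st : List String × List Char) :
    cs.foldl pvStep st = (cs.filter pvKeep).foldl
      (fun st i => if i == ' ' then (st.1 ++ [String.mk st.2], []) else (st.1, st.2 ++ [i])) st := by
  rw [List.foldl_filter]
  rfl

-- B's whole accumulation folds the pure step over the flattened kept chars
theorem B_accum (info : List String) : ∀ st : List String × List Char,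
    info.foldl (fun st element => element.toList.foldl pvStep st) st
      = (info.flatMap (fun e => e.toList.filter pvKeep)).foldl
          (fun st i => if i == ' ' then (st.1 ++ [String.mk st.2], []) else (st.1, st.2 ++ [i])) st := by
  induction info with
  | nil => simp
  | cons e rest ih =>
    intro st
    rw [List.foldl_cons, B_inner, ih, List.flatMap_cons, List.foldl_append]

-- the streaming fold realizes pvSC
theorem stream_eq_pvSC (cs : List Char) : ∀ (acc : List String) (cur : List Char),
    pvFinish (cs.foldl
        (fun st i => if i == ' ' then (st.1 ++ [String.mk st.2], []) else (st.1, st.2 ++ [i]))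
        (acc, cur)) = acc ++ (pvSC cur cs).map String.mk := by
  induction cs with
  | nil => simp [pvSC, pvFinish]
  | cons c rest ih =>
    intro acc cur
    rw [List.foldl_cons]
    by_cases h : c = ' '
    · subst h
      rw [show (if (' ' == ' ') = true then ((acc, cur).1 ++ [String.mk (acc, cur).2], ([] : List Char))
            else ((acc, cur).1, (acc, cur).2 ++ [' '])) = (acc ++ [String.mk cur], []) from by simp]
      rw [ih]
      simp [pvSC]
    · rw [show (if (c == ' ') = true then ((acc, cur).1 ++ [String.mk (acc, cur).2], ([] : List Char))
            else ((acc, cur).1, (acc, cur).2 ++ [c])) = (acc, cur ++ [c]) from by simp [h]]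
      rw [ih]
      simp [pvSC, h]

-- ===== VERDICT (by name: the statement is the Claim_ definition above) =====
theorem remove_nonwords_spec : Claim_equal_remove_nonwords := by
  intro info _
  unfold Spec_remove_nonwords remove_nonwords remove_nonwords_alt
  rw [A_accum, B_accum, stream_eq_pvSC, splitOn_eq_pvSC]
  simp
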